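-- pv_equiv track=rewrite | github.com/richkidmercier/Encrypter | getMessage.py | getNumerical
-- ===== SOURCE A (Python) =====
-- def getNumerical(fileCipher):
-- 	index = 0
-- 	fileCipherNumerical = ''
-- 	while(True):
-- 		if(index == len(fileCipher)):
-- 			break
-- 		numSubstring = ord(fileCipher[index])
-- 		status = (numSubstring >= 33 and numSubstring<=47) or (numSubstring>=58 and numSubstring<=126)
-- 		if(status):
-- 			fileCipherNumerical += str(numSubstring)
-- 		else:
-- 			fileCipherNumerical += fileCipher[index]
-- 		index += 1
-- 	return fileCipherNumerical
-- ===== SOURCE B (Python) =====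
-- def getNumerical(fileCipher):
--     # Divide and conquer: split the string in half, convert each half
--     # recursively, and concatenate; a single character is the base case.
--     n = len(fileCipher)
--     if n == 0:
--         return ''
--     if n == 1:
--         code = ord(fileCipher)
--         if (33 <= code <= 47) or (58 <= code <= 126):
--             return str(code)
--         return fileCipher
--     mid = n // 2
--     return getNumerical(fileCipher[:mid]) + getNumerical(fileCipher[mid:])
-- ===== Notes on version B (the rewrite author's own statement) =====
-- stated objective: alternative
-- what changed: Replaced A's index-while loop with left-to-right string accumulation by a divide-and-conquer recursion that splits the string in half, converts each half recursively and concatenates, with a single character as the base case.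
import Mathlib
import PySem

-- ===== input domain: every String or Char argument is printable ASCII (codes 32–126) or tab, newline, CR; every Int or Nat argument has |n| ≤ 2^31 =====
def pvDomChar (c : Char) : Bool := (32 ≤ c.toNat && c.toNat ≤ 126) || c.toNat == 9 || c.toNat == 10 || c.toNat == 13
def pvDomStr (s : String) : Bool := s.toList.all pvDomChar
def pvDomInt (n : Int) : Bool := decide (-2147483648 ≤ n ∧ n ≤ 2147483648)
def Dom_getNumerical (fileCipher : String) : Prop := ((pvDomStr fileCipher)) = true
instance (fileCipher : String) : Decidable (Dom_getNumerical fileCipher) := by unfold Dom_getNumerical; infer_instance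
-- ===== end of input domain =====

-- ===== PORT A =====
-- B replaces A's index-while accumulator loop by a halve-and-concatenate recursion (alternative decomposition, same result).
def pvLoopA : List Char → String → String
  | [], acc => acc
  | c :: rest, acc =>
    let numSubstring := c.toNat
    if ((33 ≤ numSubstring && numSubstring ≤ 47) || (58 ≤ numSubstring && numSubstring ≤ 126)) then
      pvLoopA rest (acc ++ PySem.Int.toStr numSubstring)
    else
      pvLoopA rest (acc ++ String.ofList [c])

def getNumerical (fileCipher : String) : String := pvLoopA fileCipher.toList ""

-- ===== PORT B =====
-- divide and conquer on the character list: single char is the base case, otherwise split at length/2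
def pvDC : List Char → String
  | [] => ""
  | [c] =>
    if ((33 ≤ c.toNat && c.toNat ≤ 47) || (58 ≤ c.toNat && c.toNat ≤ 126)) then
      PySem.Int.toStr c.toNat
    else
      String.ofList [c]
  | c1 :: c2 :: rest =>
    let l := c1 :: c2 :: rest
    pvDC (l.take (l.length / 2)) ++ pvDC (l.drop (l.length / 2))
termination_by l => l.length
decreasing_by
  · simp [List.length_take]; omega
  · simp; omega

def getNumerical_alt (fileCipher : String) : String := pvDC fileCipher.toList

-- ===== PRECONDITION & SPEC =====
def Spec_getNumerical (fileCipher : String) (out : String) : Prop := out = getNumerical_alt fileCipher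
instance (fileCipher : String) (out : String) : Decidable (Spec_getNumerical fileCipher out) := by unfold Spec_getNumerical; infer_instance

-- ===== CLAIM (what is proved, stated in full; the proofs are below) =====
def Claim_equal_getNumerical : Prop := ∀ (fileCipher : String), Dom_getNumerical fileCipher → Spec_getNumerical fileCipher (getNumerical fileCipher)

-- ===== LEMMAS AND PROOFS =====
-- the common per-character translation both sides realise
def pvTrans (c : Char) : String :=
  if ((33 ≤ c.toNat && c.toNat ≤ 47) || (58 ≤ c.toNat && c.toNat ≤ 126)) then
    PySem.Int.toStr c.toNat
  else
    String.ofList [c]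

theorem pvFoldl_append (l : List String) (a : String) :
    List.foldl (· ++ ·) a l = a ++ List.foldl (· ++ ·) "" l := by
  induction l generalizing a with
  | nil => simp
  | cons x rest ih =>
    simp only [List.foldl]
    rw [ih, ih ("" ++ x)]
    simp [String.append_assoc]

theorem pvJoin_cons (x : String) (l : List String) :
    String.join (x :: l) = x ++ String.join l := by
  simp only [String.join, List.foldl]
  rw [pvFoldl_append]
  simp

theorem pvJoin_append (a b : List String) :
    String.join (a ++ b) = String.join a ++ String.join b := by
  induction a with
  | nil => simp [String.join]
  | cons x rest ih => simp [pvJoin_cons, ih, String.append_assoc]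

theorem pvLoopA_join (l : List Char) (acc : String) :
    pvLoopA l acc = acc ++ String.join (l.map pvTrans) := by
  induction l generalizing acc with
  | nil => simp [pvLoopA, String.join]
  | cons c rest ih =>
    simp only [pvLoopA, List.map_cons, pvJoin_cons]
    split_ifs with h <;>
      rw [ih, ← String.append_assoc] <;> simp [pvTrans, h]

theorem pvDC_join (l : List Char) : pvDC l = String.join (l.map pvTrans) := by
  induction l using pvDC.induct with
  | case1 => simp [pvDC, String.join]
  | case2 c h => simp [pvDC, pvTrans, h, String.join]
  | case3 c h => simp [pvDC, pvTrans, h, String.join]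
  | case4 c1 c2 rest _l ih1 ih2 =>
    rw [pvDC, ih1, ih2, ← pvJoin_append, ← List.map_append, List.take_append_drop]

-- ===== VERDICT (by name: the statement is the Claim_ definition above) =====
theorem getNumerical_spec : Claim_equal_getNumerical := by
  intro s _
  unfold Spec_getNumerical getNumerical getNumerical_alt
  rw [pvLoopA_join, pvDC_join]
  simp
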